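-- pv_equiv track=rewrite | github.com/HiddeB-2158176/3D-modelling-project | Src/step_6_re2.py | find_multi_view_correspondences
-- ===== SOURCE A (Python) =====
-- def find_multi_view_correspondences(identifier_lists):
--     correspondences = {}
--     for cam_idx, id_list in enumerate(identifier_lists):
--         for x, y, ident in id_list:
--             if ident == 0:
--                 continue
--             if ident not in correspondences:
--                 correspondences[ident] = []
--             correspondences[ident].append((cam_idx, x, y))
--     return {k: v for k, v in correspondences.items() if len(v) >= 2}
-- ===== SOURCE B (Python) =====
-- def find_multi_view_correspondences(identifier_lists):
--     # Gather-by-key strategy: flatten detections once, list the distinct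
--     # identifiers in first-appearance order, then build each identifier's group
--     # by a dedicated scan over the flat list -- no per-detection dict updates.
--     flat = [(ident, (cam_idx, x, y))
--             for cam_idx, id_list in enumerate(identifier_lists)
--             for x, y, ident in id_list
--             if ident != 0]
--     seen = []
--     for ident, _ in flat:
--         if ident not in seen:
--             seen.append(ident)
--     result = {}
--     for ident in seen:
--         group = [pt for k, pt in flat if k == ident]
--         if len(group) >= 2:
--             result[ident] = group
--     return result
-- ===== Notes on version B (the rewrite author's own statement) =====
-- stated objective: alternative
-- what changed: A maintains a dict of growing buckets updated per detection and filters it afterwards; B never buckets incrementally: it flattens once, collects the distinct identifiers in first-appearance order, and materialises each group with its own scan of the flat list (repeated-scan gather instead of hash bucketing).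
import Mathlib
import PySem

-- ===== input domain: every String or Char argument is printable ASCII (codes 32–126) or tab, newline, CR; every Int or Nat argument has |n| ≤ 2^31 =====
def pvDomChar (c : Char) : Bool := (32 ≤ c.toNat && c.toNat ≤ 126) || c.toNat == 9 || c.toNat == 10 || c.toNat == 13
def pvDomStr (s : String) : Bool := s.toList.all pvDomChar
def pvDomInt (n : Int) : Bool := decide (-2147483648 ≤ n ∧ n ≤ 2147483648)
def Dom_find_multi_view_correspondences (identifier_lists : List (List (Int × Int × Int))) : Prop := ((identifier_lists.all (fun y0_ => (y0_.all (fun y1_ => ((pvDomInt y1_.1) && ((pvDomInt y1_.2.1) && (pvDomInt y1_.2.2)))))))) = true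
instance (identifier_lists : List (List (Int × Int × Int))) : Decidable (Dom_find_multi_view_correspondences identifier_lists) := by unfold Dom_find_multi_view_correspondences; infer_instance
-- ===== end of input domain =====

-- B replaces A's incremental dict bucketing (one dict update per detection, filtered at the end)
-- by a gather-by-key pass: flatten once, list distinct identifiers in first-appearance order,
-- and build each group with its own scan of the flat list (alternative, not faster).

-- ===== PORT A =====
-- dict comprehension over correspondences.items() ported as Dict.ofList of the filtered items;
-- correspondences[ident].append(t) is Dict.modify (the key is guaranteed present by the guard, so exact).
def find_multi_view_correspondences (identifier_lists : List (List (Int × Int × Int))) : List (Int × List (Int × Int × Int)) :=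
  let correspondences :=
    (PySem.List.enumerate identifier_lists).foldl
      (fun d cl =>
        cl.2.foldl
          (fun d t =>
            if t.2.2 == 0 then d
            else
              (if d.contains t.2.2 then d else d.insert t.2.2 []).modify t.2.2 []
                (· ++ [(cl.1, t.1, t.2.1)]))
          d)
      PySem.Dict.empty
  (PySem.Dict.ofList (correspondences.items.filter (fun kv => decide (2 ≤ kv.2.length)))).items

-- ===== PORT B =====
-- 'ident not in seen: seen.append(ident)' is exactly PySem.Set.add on the running list.
def find_multi_view_correspondences_alt (identifier_lists : List (List (Int × Int × Int))) : List (Int × List (Int × Int × Int)) :=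
  let flat := (PySem.List.enumerate identifier_lists).flatMap
    (fun cl => (cl.2.filter (fun t => !(t.2.2 == 0))).map (fun t => (t.2.2, cl.1, t.1, t.2.1)))
  let seen := flat.foldl (fun s q => PySem.Set.add s q.1) ([] : PySem.Set Int)
  let result := seen.foldl
    (fun d k =>
      let group := (flat.filter (fun q => q.1 == k)).map (fun q => q.2)
      if 2 ≤ group.length then d.insert k group else d)
    PySem.Dict.empty
  result.items

-- ===== PRECONDITION & SPEC =====
def Spec_find_multi_view_correspondences (identifier_lists : List (List (Int × Int × Int))) (out : List (Int × List (Int × Int × Int))) : Prop := out = find_multi_view_correspondences_alt identifier_lists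
instance (identifier_lists : List (List (Int × Int × Int))) (out : List (Int × List (Int × Int × Int))) : Decidable (Spec_find_multi_view_correspondences identifier_lists out) := by unfold Spec_find_multi_view_correspondences; infer_instance

-- ===== CLAIM =====
def Claim_equal_find_multi_view_correspondences : Prop := ∀ (identifier_lists : List (List (Int × Int × Int))), Dom_find_multi_view_correspondences identifier_lists → Spec_find_multi_view_correspondences identifier_lists (find_multi_view_correspondences identifier_lists)

-- ===== LEMMAS AND PROOFS =====

-- A's "ensure key then append" is exactly one modify with default []
lemma pv_step_collapse (d : PySem.Dict Int (List (Int × Int × Int))) (k : Int)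
    (v : Int × Int × Int) :
    (if d.contains k then d else d.insert k []).modify k [] (· ++ [v])
      = d.modify k [] (· ++ [v]) := by
  by_cases h : d.contains k = true
  · simp [h]
  · simp only [Bool.not_eq_true] at h
    simp [h, PySem.Dict.modify, PySem.Dict.getD_insert_self,
      PySem.Dict.insert_insert_self, PySem.Dict.getD_of_not_contains d ([] : List (Int × Int × Int)) h]

-- A's inner loop over one camera's list = folding the grouping step over that camera's flattened tuples
lemma pv_inner_eq (ci : Int) (l : List (Int × Int × Int))
    (d : PySem.Dict Int (List (Int × Int × Int))) :
    l.foldl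
        (fun d t =>
          if t.2.2 == 0 then d
          else (if d.contains t.2.2 then d else d.insert t.2.2 []).modify t.2.2 []
            (· ++ [(ci, t.1, t.2.1)]))
        d
      = ((l.filter (fun t => !(t.2.2 == 0))).map (fun t => (t.2.2, ci, t.1, t.2.1))).foldl
          (fun d q => d.modify q.1 [] (· ++ [q.2])) d := by
  induction l generalizing d with
  | nil => rfl
  | cons t ts ih =>
    by_cases h : (t.2.2 == 0) = true
    · simp only [List.foldl_cons, List.filter_cons, h, if_true, Bool.not_true]
      exact ih d
    · simp only [List.foldl_cons, List.filter_cons, h, if_false, Bool.not_false,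
        Bool.false_eq_true, if_true, List.map_cons]
      rw [pv_step_collapse]
      exact ih _

-- (Dict.ofList l).items = l when l's keys are distinct
lemma pv_items_ofList {ν : Type} (l : List (Int × ν)) (h : (l.map Prod.fst).Nodup) :
    (PySem.Dict.ofList l).items = l := by
  have := PySem.Dict.items_foldl_insert_fresh l Prod.fst Prod.snd PySem.Dict.empty
    (fun a _ => by simp [PySem.Dict.contains_empty]) h
  simpa [PySem.Dict.ofList, PySem.Dict.update, PySem.Dict.items] using this

-- the whole equivalence, for an arbitrary enumerated list E
lemma pv_main (E : List (Int × List (Int × Int × Int))) :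
    (PySem.Dict.ofList
        (((E.foldl
              (fun d cl =>
                cl.2.foldl
                  (fun d t =>
                    if t.2.2 == 0 then d
                    else
                      (if d.contains t.2.2 then d else d.insert t.2.2 []).modify t.2.2 []
                        (· ++ [(cl.1, t.1, t.2.1)]))
                  d)
              PySem.Dict.empty).items).filter (fun kv => decide (2 ≤ kv.2.length)))).items
    = (let flat := E.flatMap
          (fun cl => (cl.2.filter (fun t => !(t.2.2 == 0))).map (fun t => (t.2.2, cl.1, t.1, t.2.1)))
       let seen := flat.foldl (fun s q => PySem.Set.add s q.1) ([] : PySem.Set Int)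
       let result := seen.foldl
         (fun d k =>
           let group := (flat.filter (fun q => q.1 == k)).map (fun q => q.2)
           if 2 ≤ group.length then d.insert k group else d)
         PySem.Dict.empty
       result.items) := by
  set g : (Int × List (Int × Int × Int)) → List (Int × Int × Int × Int) :=
    fun cl => (cl.2.filter (fun t => !(t.2.2 == 0))).map (fun t => (t.2.2, cl.1, t.1, t.2.1)) with hg
  set flat : List (Int × Int × Int × Int) := E.flatMap g with hflat
  set grp : Int → List (Int × Int × Int) :=
    fun k => (flat.filter (fun q => q.1 == k)).map (fun q => q.2) with hgrp
  set p : Int → Bool := fun k => decide (2 ≤ (grp k).length) with hp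
  -- A's nested loop is one fold of the grouping step over flat
  have hA : E.foldl
      (fun d cl =>
        cl.2.foldl
          (fun d t =>
            if t.2.2 == 0 then d
            else (if d.contains t.2.2 then d else d.insert t.2.2 []).modify t.2.2 []
              (· ++ [(cl.1, t.1, t.2.1)]))
          d)
      PySem.Dict.empty
      = flat.foldl (fun d q => d.modify q.1 [] (· ++ [q.2])) PySem.Dict.empty := by
    rw [hflat, List.foldl_flatMap]
    refine PySem.List.foldl_congr_mem E _ _ _ (fun d cl _ => ?_)
    exact pv_inner_eq cl.1 cl.2 d
  dsimp only
  rw [hA]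
  set DA : PySem.Dict Int (List (Int × Int × Int)) :=
    flat.foldl (fun d q => d.modify q.1 [] (· ++ [q.2])) PySem.Dict.empty with hDA
  have hndA : DA.keys.Nodup := by
    rw [hDA]
    exact PySem.Dict.nodup_keys_foldl_modify_key flat (fun q => q.1) [] (fun _ q => (· ++ [q.2]))
      PySem.Dict.empty (by simp [PySem.Dict.keys_empty])
  have hgA : ∀ k : Int, DA.getD k [] = grp k := by
    intro k
    rw [hDA, hgrp]
    simpa [PySem.Dict.getD_empty] using PySem.Dict.getD_foldl_modify_append flat PySem.Dict.empty k
  have hkA : DA.keys = PySem.Set.ofList (flat.map (fun q => q.1)) := by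
    rw [hDA]
    have := PySem.Dict.keys_foldl_modify_key flat (fun q => q.1) ([] : List (Int × Int × Int))
      (fun _ q => (· ++ [q.2])) PySem.Dict.empty
    simp only [PySem.Dict.keys_empty] at this
    rw [this, PySem.Set.update, PySem.Set.ofList_eq_foldl]
  -- B's seen loop builds set(ids) in first-appearance order
  have hseen : flat.foldl (fun s q => PySem.Set.add s q.1) ([] : PySem.Set Int)
      = PySem.Set.ofList (flat.map (fun q => q.1)) := by
    rw [PySem.Set.ofList_eq_foldl, List.foldl_map]
  rw [hseen, ← hkA]
  -- B's result loop: conditional inserts = inserts over the filtered key list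
  have hB : DA.keys.foldl
        (fun d k => if 2 ≤ (grp k).length then d.insert k (grp k) else d)
        PySem.Dict.empty
      = (DA.keys.filter p).foldl (fun d k => d.insert k (grp k)) PySem.Dict.empty := by
    rw [← PySem.List.foldl_if_eq_foldl_filter p (fun d k => d.insert k (grp k)) DA.keys
      PySem.Dict.empty]
    refine PySem.List.foldl_congr_mem DA.keys _ _ _ (fun d k _ => ?_)
    rw [hp]
    by_cases h2 : 2 ≤ (grp k).length <;> simp [h2]
  have hBitems : ((DA.keys.filter p).foldl (fun d k => d.insert k (grp k)) PySem.Dict.empty).items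
      = (DA.keys.filter p).map (fun k => (k, grp k)) := by
    have := PySem.Dict.items_foldl_insert_fresh (DA.keys.filter p) (fun k => k) grp
      PySem.Dict.empty (fun a _ => by simp [PySem.Dict.contains_empty])
      (by simpa using List.Nodup.sublist (List.filter_sublist (l := DA.keys) (p := p)) hndA)
    simpa [PySem.Dict.items] using this
  rw [hB, hBitems]
  -- A's dict comprehension: items of ofList of the filtered items
  have hsub : ((DA.items.filter (fun kv => decide (2 ≤ kv.2.length))).map
        (fun kv : Int × List (Int × Int × Int) => kv.1)).Sublist
      (DA.items.map (fun kv => kv.1)) :=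
    List.Sublist.map _ List.filter_sublist
  have hndA' := List.Nodup.sublist hsub (by simpa [PySem.Dict.keys] using hndA)
  rw [pv_items_ofList _ hndA']
  rw [PySem.Dict.items_eq_map_keys DA hndA ([] : List (Int × Int × Int)), List.filter_map]
  have hpred : ∀ k ∈ DA.keys,
      ((fun kv : Int × List (Int × Int × Int) => decide (2 ≤ kv.2.length)) ∘
        (fun k => (k, DA.getD k []))) k = p k := by
    intro k _
    show decide (2 ≤ (DA.getD k []).length) = p k
    rw [hgA, hp]
  rw [List.filter_congr hpred]
  refine List.map_congr_left (fun k _ => ?_)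
  rw [hgA]

-- ===== VERDICT =====
theorem find_multi_view_correspondences_spec : Claim_equal_find_multi_view_correspondences := by
  intro ils _
  unfold Spec_find_multi_view_correspondences
  unfold find_multi_view_correspondences find_multi_view_correspondences_alt
  exact pv_main (PySem.List.enumerate ils)
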